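-- pv_equiv track=rewrite | github.com/dbaxa/django_xss_detection | django_xss_detection/util.py | get_non_quoted_content
-- ===== SOURCE A (Python) =====
-- def get_non_quoted_content(content):
--     ret = []
--     quote_chrs = {"'", '"'}
--     if not quote_chrs.intersection(set(content)):
--         return content
--     inside_quote = None
--     for ch in content:
--         if ch in quote_chrs:
--             if inside_quote is None:
--                 inside_quote = ch
--             elif ch == inside_quote:
--                 inside_quote = None
--         else:
--             if inside_quote is None:
--                 ret.append(ch)
--     return ''.join(ret)
-- ===== SOURCE B (Python) =====
-- def get_non_quoted_content(content):
--     # Consume one shared iterator: on an opening quote, an inner loop eats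
--     # everything up to the matching close (non-matching quotes included).
--     out = []
--     it = iter(content)
--     for ch in it:
--         if ch in "'\"":
--             for ch2 in it:
--                 if ch2 == ch:
--                     break
--         else:
--             out.append(ch)
--     return ''.join(out)
-- ===== Notes on version B (the rewrite author's own statement) =====
-- stated objective: idiomatic
-- what changed: Replaced A's single-pass state machine (an inside_quote flag consulted on every character) by a shared-iterator nested loop: the outer loop copies characters, and on an opening quote an inner loop consumes the quoted span up to its matching close, so no quote state is carried; the quote-presence early-return guard is dropped since the loop already returns the input unchanged then.
import Mathlib
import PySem

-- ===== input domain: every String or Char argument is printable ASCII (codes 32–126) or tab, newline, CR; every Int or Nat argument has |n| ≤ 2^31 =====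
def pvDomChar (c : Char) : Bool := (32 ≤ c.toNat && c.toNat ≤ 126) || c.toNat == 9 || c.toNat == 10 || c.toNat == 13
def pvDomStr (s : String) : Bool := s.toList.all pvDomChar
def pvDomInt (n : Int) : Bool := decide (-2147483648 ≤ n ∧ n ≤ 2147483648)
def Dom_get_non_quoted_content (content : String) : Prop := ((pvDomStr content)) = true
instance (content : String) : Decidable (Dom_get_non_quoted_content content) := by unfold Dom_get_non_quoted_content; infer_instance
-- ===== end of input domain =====

-- B replaces A's inside_quote state machine by a shared-iterator nested loop
-- (an inner loop skips each quoted span); objective: idiomatic, same cost.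

-- ===== PORT A =====
-- one iteration of A's for-loop: state = (inside_quote, ret)
def pvA_step (st : Option Char × List Char) (ch : Char) : Option Char × List Char :=
  if ch = '\'' ∨ ch = '\"' then
    match st.1 with
    | none => (some ch, st.2)
    | some q => if ch = q then (none, st.2) else st
  else
    match st.1 with
    | none => (none, st.2 ++ [ch])
    | some _ => st

def get_non_quoted_content (content : String) : String :=
  -- `if not quote_chrs.intersection(set(content)): return content`
  if content.toList.any (fun c => c = '\'' ∨ c = '\"') = false then content
  else String.ofList (content.toList.foldl pvA_step (none, [])).2

-- ===== PORT B =====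
-- inner `for ch2 in it: if ch2 == ch: break` — consumes up to and including the close
def pvB_skip (q : Char) : List Char → List Char
  | [] => []
  | c :: cs => if c = q then cs else pvB_skip q cs

theorem pvB_skip_length_le (q : Char) (l : List Char) : (pvB_skip q l).length ≤ l.length := by
  induction l with
  | nil => simp [pvB_skip]
  | cons c cs ih =>
    simp only [pvB_skip]
    split
    · simp
    · exact Nat.le_succ_of_le ih

-- outer `for ch in it`
def pvB_go : List Char → List Char
  | [] => []
  | c :: cs =>
    if c = '\'' ∨ c = '\"' then pvB_go (pvB_skip c cs)
    else c :: pvB_go cs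
  termination_by l => l.length
  decreasing_by
    · simpa using Nat.lt_succ_of_le (pvB_skip_length_le c cs)
    · simp

def get_non_quoted_content_alt (content : String) : String :=
  String.ofList (pvB_go content.toList)

-- ===== PRECONDITION & SPEC =====
def Spec_get_non_quoted_content (content : String) (out : String) : Prop := out = get_non_quoted_content_alt content
instance (content : String) (out : String) : Decidable (Spec_get_non_quoted_content content out) := by unfold Spec_get_non_quoted_content; infer_instance

-- ===== CLAIM (what is proved, stated in full; the proofs are below) =====
def Claim_equal_get_non_quoted_content : Prop := ∀ (content : String), Dom_get_non_quoted_content content → Spec_get_non_quoted_content content (get_non_quoted_content content)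

-- ===== LEMMAS AND PROOFS =====

-- inside a quote q, A ignores everything until the next q: its fold over l from
-- state (some q, acc) emits the same characters as a fold from (none, acc) over
-- what remains after B's skip.
theorem pvA_inside_eq_skip (q : Char) (hq : q = '\'' ∨ q = '\"') (l : List Char) (acc : List Char) :
    (l.foldl pvA_step (some q, acc)).2 = ((pvB_skip q l).foldl pvA_step (none, acc)).2 := by
  induction l generalizing acc with
  | nil => simp [pvB_skip]
  | cons c cs ih =>
    by_cases hq2 : c = q
    · subst hq2
      have hstep : pvA_step (some c, acc) c = (none, acc) := by
        simp [pvA_step, hq]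
      simp [pvB_skip, List.foldl_cons, hstep]
    · have hstep : pvA_step (some q, acc) c = (some q, acc) := by
        by_cases hc : c = '\'' ∨ c = '\"' <;> simp [pvA_step, hc, hq2]
      simp [pvB_skip, hq2, List.foldl_cons, hstep, ih]

-- A's fold from the outside-quote state appends exactly B's output
theorem pvA_fold_eq_go (l : List Char) (acc : List Char) :
    (l.foldl pvA_step (none, acc)).2 = acc ++ pvB_go l := by
  induction l using pvB_go.induct generalizing acc with
  | case1 => simp [pvB_go]
  | case2 c cs hq ih =>
    have hstep : pvA_step (none, acc) c = (some c, acc) := by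
      simp [pvA_step, hq]
    rw [List.foldl_cons, hstep, pvA_inside_eq_skip c hq, ih, pvB_go]
    simp [hq]
  | case3 c cs hq ih =>
    have hstep : pvA_step (none, acc) c = (none, acc ++ [c]) := by
      simp [pvA_step, hq]
    rw [List.foldl_cons, hstep, ih, pvB_go]
    simp [hq]

-- with no quote character present, B returns its input unchanged
theorem pvB_go_no_quote (l : List Char) (h : l.any (fun c => c = '\'' ∨ c = '\"') = false) :
    pvB_go l = l := by
  induction l with
  | nil => simp [pvB_go]
  | cons c cs ih =>
    simp only [List.any_cons, Bool.or_eq_false_iff] at h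
    rw [pvB_go]
    simp only [decide_eq_false_iff_not] at h
    simp [h.1, ih h.2]

-- ===== VERDICT (by name: the statement is the Claim_ definition above) =====
theorem get_non_quoted_content_spec : Claim_equal_get_non_quoted_content := by
  intro content _
  unfold Spec_get_non_quoted_content get_non_quoted_content get_non_quoted_content_alt
  split
  · next h => rw [pvB_go_no_quote _ h]; exact String.ofList_toList.symm
  · rw [pvA_fold_eq_go]; simp
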